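-- pv_equiv track=rewrite | github.com/MarcoYou/OpenProxy_MCP | open_proxy_mcp/services/treasury_share.py | _summary_counts
-- ===== SOURCE A (Python) =====
-- from typing import Any
--
-- def _summary_counts(bundles: dict[str, list[dict]]) -> dict[str, Any]:
--     acq = bundles.get("acquisition", [])
--     # 취득목적에 "소각" 명시된 건. 별도 소각결정 공시 없는 기업(예: 미래에셋증권)에서 주주환원 신호로 쓰임.
--     acq_for_cancelation = [r for r in acq if r.get("for_cancelation")]
--     cancelations = bundles.get("cancelation", [])
--     return {
--         "acquisition_count": len(acq),
--         "acquisition_for_cancelation_count": len(acq_for_cancelation),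
--         "disposal_count": len(bundles.get("disposal", [])),
--         "trust_contract_count": len(bundles.get("trust_contract", [])),
--         "trust_termination_count": len(bundles.get("trust_termination", [])),
--         "cancelation_count": len(cancelations),
--         "total_event_count": sum(len(bundles.get(k, [])) for k in ("acquisition", "disposal", "trust_contract", "trust_termination", "cancelation")),
--         "acquisition_shares_total": sum(r.get("shares", 0) for r in acq),
--         "acquisition_amount_total_krw": sum(r.get("amount_krw", 0) for r in acq),
--         "acquisition_for_cancelation_shares_total": sum(r.get("shares", 0) for r in acq_for_cancelation),
--         "acquisition_for_cancelation_amount_total_krw": sum(r.get("amount_krw", 0) for r in acq_for_cancelation),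
--         "disposal_shares_total": sum(r.get("shares", 0) for r in bundles.get("disposal", [])),
--         "trust_contract_amount_total_krw": sum(r.get("amount_krw", 0) for r in bundles.get("trust_contract", [])),
--         # 소각 금액·수량 — 자사주 정책 분석용 (CSR 분자에는 사용하지 않음, retire가 아닌 acquire 사용).
--         "cancelation_shares_total": sum(r.get("shares", 0) for r in cancelations),
--         "cancelation_amount_total_krw": sum(r.get("amount_krw", 0) for r in cancelations),
--         "cancelation_body_parsed_count": sum(1 for r in cancelations if r.get("body_parsed")),
--     }
-- ===== SOURCE B (Python) =====
-- def _summary_counts(bundles):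
--     # Fused single-pass accumulators per category instead of ~17 comprehensions.
--     acq_n = acq_s = acq_a = fc_n = fc_s = fc_a = 0
--     for r in bundles.get("acquisition", []):
--         sh = r.get("shares", 0)
--         am = r.get("amount_krw", 0)
--         acq_n += 1
--         acq_s += sh
--         acq_a += am
--         if r.get("for_cancelation"):
--             fc_n += 1
--             fc_s += sh
--             fc_a += am
--
--     def tally(rows):
--         n = s = a = 0
--         for r in rows:
--             n += 1
--             s += r.get("shares", 0)
--             a += r.get("amount_krw", 0)
--         return n, s, a
--
--     disp_n, disp_s, _ = tally(bundles.get("disposal", []))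
--     tc_n, _, tc_a = tally(bundles.get("trust_contract", []))
--     tt_n, _, _ = tally(bundles.get("trust_termination", []))
--
--     can_n = can_s = can_a = bp_n = 0
--     for r in bundles.get("cancelation", []):
--         can_n += 1
--         can_s += r.get("shares", 0)
--         can_a += r.get("amount_krw", 0)
--         if r.get("body_parsed"):
--             bp_n += 1
--
--     return {
--         "acquisition_count": acq_n,
--         "acquisition_for_cancelation_count": fc_n,
--         "disposal_count": disp_n,
--         "trust_contract_count": tc_n,
--         "trust_termination_count": tt_n,
--         "cancelation_count": can_n,
--         "total_event_count": acq_n + disp_n + tc_n + tt_n + can_n,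
--         "acquisition_shares_total": acq_s,
--         "acquisition_amount_total_krw": acq_a,
--         "acquisition_for_cancelation_shares_total": fc_s,
--         "acquisition_for_cancelation_amount_total_krw": fc_a,
--         "disposal_shares_total": disp_s,
--         "trust_contract_amount_total_krw": tc_a,
--         "cancelation_shares_total": can_s,
--         "cancelation_amount_total_krw": can_a,
--         "cancelation_body_parsed_count": bp_n,
--     }
-- ===== Notes on version B (the rewrite author's own statement) =====
-- stated objective: simpler
-- what changed: Replaces ~17 separate comprehensions/generator passes over the category lists with one fused accumulator loop per category (count, shares and amount totals maintained together, the acquisition loop also tallying the for_cancelation subset), and total_event_count is the sum of the five counts instead of a sixth pass.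
import Mathlib
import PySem

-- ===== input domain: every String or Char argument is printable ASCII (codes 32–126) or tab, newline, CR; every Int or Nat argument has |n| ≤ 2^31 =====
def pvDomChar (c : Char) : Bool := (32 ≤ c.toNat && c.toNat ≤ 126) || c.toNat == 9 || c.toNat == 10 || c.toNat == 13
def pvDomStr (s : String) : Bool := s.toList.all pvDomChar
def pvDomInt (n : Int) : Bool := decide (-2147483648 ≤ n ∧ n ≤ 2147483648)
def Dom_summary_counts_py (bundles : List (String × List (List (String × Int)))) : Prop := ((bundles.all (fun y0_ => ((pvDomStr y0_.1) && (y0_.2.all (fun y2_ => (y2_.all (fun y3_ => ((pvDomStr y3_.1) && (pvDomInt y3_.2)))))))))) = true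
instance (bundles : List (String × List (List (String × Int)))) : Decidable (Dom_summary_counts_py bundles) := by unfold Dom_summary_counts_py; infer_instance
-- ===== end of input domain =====

-- B restates A by a different decomposition: one fused accumulator loop per category
-- instead of ~17 separate comprehension passes; return value only, no side effects.

-- shared record accessors (r.get(k, 0) and truthiness of r.get(k))
def pvRGet (r : List (String × Int)) (k : String) : Int := (PySem.Dict.mk r).getD k 0
def pvTruthy (r : List (String × Int)) (k : String) : Bool :=
  match (PySem.Dict.mk r).get? k with
  | some v => v != 0
  | none => false

-- ===== PORT A =====
def summary_counts_py (bundles : List (String × List (List (String × Int)))) : List (String × Int) :=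
  let d := PySem.Dict.mk bundles
  let acq := d.getD "acquisition" []
  let acq_fc := acq.filter (fun r => pvTruthy r "for_cancelation")
  let cancelations := d.getD "cancelation" []
  [("acquisition_count", (acq.length : Int)),
   ("acquisition_for_cancelation_count", (acq_fc.length : Int)),
   ("disposal_count", ((d.getD "disposal" []).length : Int)),
   ("trust_contract_count", ((d.getD "trust_contract" []).length : Int)),
   ("trust_termination_count", ((d.getD "trust_termination" []).length : Int)),
   ("cancelation_count", (cancelations.length : Int)),
   ("total_event_count",
      (["acquisition", "disposal", "trust_contract", "trust_termination", "cancelation"].map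
        (fun k => ((d.getD k []).length : Int))).sum),
   ("acquisition_shares_total", (acq.map (fun r => pvRGet r "shares")).sum),
   ("acquisition_amount_total_krw", (acq.map (fun r => pvRGet r "amount_krw")).sum),
   ("acquisition_for_cancelation_shares_total", (acq_fc.map (fun r => pvRGet r "shares")).sum),
   ("acquisition_for_cancelation_amount_total_krw", (acq_fc.map (fun r => pvRGet r "amount_krw")).sum),
   ("disposal_shares_total", ((d.getD "disposal" []).map (fun r => pvRGet r "shares")).sum),
   ("trust_contract_amount_total_krw", ((d.getD "trust_contract" []).map (fun r => pvRGet r "amount_krw")).sum),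
   ("cancelation_shares_total", (cancelations.map (fun r => pvRGet r "shares")).sum),
   ("cancelation_amount_total_krw", (cancelations.map (fun r => pvRGet r "amount_krw")).sum),
   ("cancelation_body_parsed_count", ((cancelations.filter (fun r => pvTruthy r "body_parsed")).length : Int))]

-- ===== PORT B =====
-- the acquisition loop: count/shares/amount plus the for_cancelation sub-tallies, fused
def pvAcqStep (acc : Int × Int × Int × Int × Int × Int) (r : List (String × Int)) :
    Int × Int × Int × Int × Int × Int :=
  let sh := pvRGet r "shares"
  let am := pvRGet r "amount_krw"
  match acc with
  | (n, s, a, fn, fs, fa) =>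
    if pvTruthy r "for_cancelation" then (n + 1, s + sh, a + am, fn + 1, fs + sh, fa + am)
    else (n + 1, s + sh, a + am, fn, fs, fa)

-- tally(rows): count, shares total, amount total in one pass
def pvTally (rows : List (List (String × Int))) : Int × Int × Int :=
  rows.foldl (fun acc r => (acc.1 + 1, acc.2.1 + pvRGet r "shares", acc.2.2 + pvRGet r "amount_krw"))
    (0, 0, 0)

-- the cancelation loop: count/shares/amount plus the body_parsed count, fused
def pvCanStep (acc : Int × Int × Int × Int) (r : List (String × Int)) : Int × Int × Int × Int :=
  match acc with
  | (n, s, a, bp) =>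
    (n + 1, s + pvRGet r "shares", a + pvRGet r "amount_krw",
     if pvTruthy r "body_parsed" then bp + 1 else bp)

def summary_counts_py_alt (bundles : List (String × List (List (String × Int)))) : List (String × Int) :=
  let d := PySem.Dict.mk bundles
  match (d.getD "acquisition" []).foldl pvAcqStep (0, 0, 0, 0, 0, 0),
        pvTally (d.getD "disposal" []), pvTally (d.getD "trust_contract" []),
        pvTally (d.getD "trust_termination" []),
        (d.getD "cancelation" []).foldl pvCanStep (0, 0, 0, 0) with
  | (an, asu, aam, fn, fs, fa), (dn, ds, _), (tcn, _, tca), (ttn, _, _), (cn, cs, ca, bp) =>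
    [("acquisition_count", an),
     ("acquisition_for_cancelation_count", fn),
     ("disposal_count", dn),
     ("trust_contract_count", tcn),
     ("trust_termination_count", ttn),
     ("cancelation_count", cn),
     ("total_event_count", an + dn + tcn + ttn + cn),
     ("acquisition_shares_total", asu),
     ("acquisition_amount_total_krw", aam),
     ("acquisition_for_cancelation_shares_total", fs),
     ("acquisition_for_cancelation_amount_total_krw", fa),
     ("disposal_shares_total", ds),
     ("trust_contract_amount_total_krw", tca),
     ("cancelation_shares_total", cs),
     ("cancelation_amount_total_krw", ca),
     ("cancelation_body_parsed_count", bp)]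

-- ===== PRECONDITION & SPEC =====
def Spec_summary_counts_py (bundles : List (String × List (List (String × Int)))) (out : List (String × Int)) : Prop := out = summary_counts_py_alt bundles
instance (bundles : List (String × List (List (String × Int)))) (out : List (String × Int)) : Decidable (Spec_summary_counts_py bundles out) := by unfold Spec_summary_counts_py; infer_instance

-- ===== CLAIM (what is proved, stated in full; the proofs are below) =====
def Claim_equal_summary_counts_py : Prop := ∀ (bundles : List (String × List (List (String × Int)))), Dom_summary_counts_py bundles → Spec_summary_counts_py bundles (summary_counts_py bundles)

-- ===== LEMMAS AND PROOFS =====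
theorem pvAcq_foldl (rows : List (List (String × Int))) (n s a fn fs fa : Int) :
    rows.foldl pvAcqStep (n, s, a, fn, fs, fa) =
      (n + rows.length, s + (rows.map (fun r => pvRGet r "shares")).sum,
       a + (rows.map (fun r => pvRGet r "amount_krw")).sum,
       fn + (rows.filter (fun r => pvTruthy r "for_cancelation")).length,
       fs + ((rows.filter (fun r => pvTruthy r "for_cancelation")).map (fun r => pvRGet r "shares")).sum,
       fa + ((rows.filter (fun r => pvTruthy r "for_cancelation")).map (fun r => pvRGet r "amount_krw")).sum) := by
  induction rows generalizing n s a fn fs fa with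
  | nil => simp
  | cons r rest ih =>
    simp only [List.foldl_cons, pvAcqStep, List.filter_cons, List.map_cons, List.sum_cons,
      List.length_cons]
    by_cases h : pvTruthy r "for_cancelation" = true
    · simp only [h, ih]
      push_cast; refine Prod.ext ?_ (Prod.ext ?_ (Prod.ext ?_ (Prod.ext ?_ (Prod.ext ?_ ?_)))) <;> simp <;> ring
    · simp only [h, Bool.false_eq_true, ih]
      push_cast; refine Prod.ext ?_ (Prod.ext ?_ (Prod.ext ?_ (Prod.ext ?_ (Prod.ext ?_ ?_)))) <;> simp <;> ring

theorem pvTally_foldl (rows : List (List (String × Int))) (n s a : Int) :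
    rows.foldl (fun acc r => (acc.1 + 1, acc.2.1 + pvRGet r "shares", acc.2.2 + pvRGet r "amount_krw"))
        (n, s, a) =
      (n + rows.length, s + (rows.map (fun r => pvRGet r "shares")).sum,
       a + (rows.map (fun r => pvRGet r "amount_krw")).sum) := by
  induction rows generalizing n s a with
  | nil => simp
  | cons r rest ih =>
    simp only [List.foldl_cons, ih, List.map_cons, List.sum_cons, List.length_cons]
    push_cast; refine Prod.ext ?_ (Prod.ext ?_ ?_) <;> simp <;> ring

theorem pvTally_spec (rows : List (List (String × Int))) :
    pvTally rows = ((rows.length : Int), (rows.map (fun r => pvRGet r "shares")).sum,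
      (rows.map (fun r => pvRGet r "amount_krw")).sum) := by
  simpa using pvTally_foldl rows 0 0 0

theorem pvCan_foldl (rows : List (List (String × Int))) (n s a bp : Int) :
    rows.foldl pvCanStep (n, s, a, bp) =
      (n + rows.length, s + (rows.map (fun r => pvRGet r "shares")).sum,
       a + (rows.map (fun r => pvRGet r "amount_krw")).sum,
       bp + (rows.filter (fun r => pvTruthy r "body_parsed")).length) := by
  induction rows generalizing n s a bp with
  | nil => simp
  | cons r rest ih =>
    simp only [List.foldl_cons, pvCanStep, List.filter_cons, List.map_cons, List.sum_cons,
      List.length_cons]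
    by_cases h : pvTruthy r "body_parsed" = true
    · simp only [h, ih]
      push_cast; refine Prod.ext ?_ (Prod.ext ?_ (Prod.ext ?_ ?_)) <;> simp <;> ring
    · simp only [h, Bool.false_eq_true, ih]
      push_cast; refine Prod.ext ?_ (Prod.ext ?_ (Prod.ext ?_ ?_)) <;> simp <;> ring

-- ===== VERDICT (by name: the statement is the Claim_ definition above) =====
theorem summary_counts_py_spec : Claim_equal_summary_counts_py := by
  intro bundles _
  unfold Spec_summary_counts_py summary_counts_py summary_counts_py_alt
  simp only [pvAcq_foldl, pvTally_spec, pvCan_foldl, List.map_cons, List.map_nil,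
    List.sum_cons, List.sum_nil]
  ring_nf
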